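-- pv_equiv track=rewrite | github.com/fescofesco/CCC | Challenge 2025/Johannes/LEVEL5/level5_solution.py | build_sequences_from_bfs_path
-- ===== SOURCE A (Python) =====
-- def build_sequences_from_bfs_path(path, time_limit):
--     """Convert BFS path to pace sequences, handling each axis independently."""
--     if len(path) <= 1:
--         return [0], [0]
--
--     # Extract X and Y movements separately
--     x_movements = []
--     y_movements = []
--
--     for i in range(len(path) - 1):
--         x1, y1 = path[i]
--         x2, y2 = path[i + 1]
--
--         if x2 != x1:
--             x_movements.append(1 if x2 > x1 else -1)
--         if y2 != y1:
--             y_movements.append(1 if y2 > y1 else -1)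
--
--     # Generate sequences for each axis
--     def movements_to_sequence(movements):
--         if not movements:
--             return [0]
--
--         sequence = [0]
--         direction = movements[0]
--         count = len(movements)
--
--         # Use efficient pace patterns
--         if count == 1:
--             sequence.extend([5 * direction, 0])
--         elif count == 2:
--             sequence.extend([5 * direction, 5 * direction, 0])
--         elif count >= 9:
--             extra_at_1 = count - 9
--             for pace in range(5, 0, -1):
--                 sequence.append(pace * direction)
--             for _ in range(extra_at_1):
--                 sequence.append(1 * direction)
--             for pace in range(2, 6):
--                 sequence.append(pace * direction)
--             sequence.append(0)
--         else:
--             patterns = {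
--                 3: [5, 4, 5],
--                 4: [5, 4, 4, 5],
--                 5: [5, 4, 3, 4, 5],
--                 6: [5, 4, 3, 3, 4, 5],
--                 7: [5, 4, 3, 2, 3, 4, 5],
--                 8: [5, 4, 3, 2, 2, 3, 4, 5]
--             }
--             sequence.extend([p * direction for p in patterns[count]])
--             sequence.append(0)
--
--         return sequence
--
--     x_seq = movements_to_sequence(x_movements)
--     y_seq = movements_to_sequence(y_movements)
--
--     return x_seq, y_seq
-- ===== SOURCE B (Python) =====
-- def build_sequences_from_bfs_path(path, time_limit):
--     """Convert BFS path to pace sequences, handling each axis independently."""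
--     if len(path) <= 1:
--         return [0], [0]
--
--     def axis_movements(axis):
--         return [1 if b[axis] > a[axis] else -1
--                 for a, b in zip(path, path[1:]) if b[axis] != a[axis]]
--
--     def ramp(movements):
--         # closed-form symmetric ramp: pace at step i is max(1, 5 - min(i, n-1-i))
--         if not movements:
--             return [0]
--         d = movements[0]
--         n = len(movements)
--         return [0] + [max(1, 5 - min(i, n - 1 - i)) * d for i in range(n)] + [0]
--
--     return ramp(axis_movements(0)), ramp(axis_movements(1))
-- ===== Notes on version B (the rewrite author's own statement) =====
-- stated objective: simpler
-- what changed: B replaces A's pattern dictionary and the four length special-cases (1, 2, 3-8, >=9) in movements_to_sequence by one closed-form symmetric-ramp formula max(1, 5 - min(i, n-1-i))*direction, and builds the per-axis movement lists with a single zip comprehension over adjacent pairs instead of an index loop.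
import Mathlib
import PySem

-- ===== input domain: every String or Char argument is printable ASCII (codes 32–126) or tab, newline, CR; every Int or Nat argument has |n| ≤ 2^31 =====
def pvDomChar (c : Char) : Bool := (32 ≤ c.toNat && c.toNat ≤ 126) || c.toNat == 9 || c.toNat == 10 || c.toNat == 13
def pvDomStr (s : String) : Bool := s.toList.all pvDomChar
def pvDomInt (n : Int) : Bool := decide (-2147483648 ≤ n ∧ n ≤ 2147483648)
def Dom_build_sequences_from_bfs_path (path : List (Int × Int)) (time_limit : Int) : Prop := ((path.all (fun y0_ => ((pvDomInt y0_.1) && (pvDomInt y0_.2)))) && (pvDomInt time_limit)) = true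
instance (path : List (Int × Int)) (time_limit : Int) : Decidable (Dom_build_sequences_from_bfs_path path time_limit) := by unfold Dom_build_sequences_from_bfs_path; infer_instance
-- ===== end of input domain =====

-- B replaces A's pattern dictionary and four length special-cases by one closed-form
-- symmetric-ramp formula max(1, 5 - min(i, n-1-i)); objective: simpler.

-- ===== PORT A =====

-- the body of A's movement-extrating loop at index i (indices i, i+1 are always in
-- range for i < len(path)-1, so pyGetD's default is never used)
def pvA_step (path : List (Int × Int)) (acc : List Int × List Int) (i : Nat) : List Int × List Int :=
  let p1 := PySem.List.pyGetD path (i : Int) (0, 0)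
  let p2 := PySem.List.pyGetD path ((i : Int) + 1) (0, 0)
  let xs := if p2.1 ≠ p1.1 then acc.1 ++ [if p2.1 > p1.1 then (1:Int) else -1] else acc.1
  let ys := if p2.2 ≠ p1.2 then acc.2 ++ [if p2.2 > p1.2 then (1:Int) else -1] else acc.2
  (xs, ys)

-- 'patterns' dict literal from A
def pvA_patterns : PySem.Dict Nat (List Int) :=
  PySem.Dict.ofList [(3, [5,4,5]), (4, [5,4,4,5]), (5, [5,4,3,4,5]),
                     (6, [5,4,3,3,4,5]), (7, [5,4,3,2,3,4,5]), (8, [5,4,3,2,2,3,4,5])]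

-- movements_to_sequence (the dict lookup patterns[count] always hits: count ∈ 3..8 there)
def pvA_seq (movements : List Int) : List Int :=
  if movements = [] then [0]
  else
    let direction := movements.headD 0
    let count := movements.length
    if count = 1 then [0] ++ [5 * direction, 0]
    else if count = 2 then [0] ++ [5 * direction, 5 * direction, 0]
    else if 9 ≤ count then
      let s := (PySem.List.pyRange 5 0 (-1)).foldl (fun s p => s ++ [p * direction]) [0]
      let s := (List.range (count - 9)).foldl (fun s _ => s ++ [1 * direction]) s
      let s := (PySem.List.pyRange 2 6 1).foldl (fun s p => s ++ [p * direction]) s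
      s ++ [0]
    else
      ([0] ++ (pvA_patterns.getD count []).map (fun p => p * direction)) ++ [0]

def build_sequences_from_bfs_path (path : List (Int × Int)) (time_limit : Int) : List Int × List Int :=
  if path.length ≤ 1 then ([0], [0])
  else
    let mov := (List.range (path.length - 1)).foldl (pvA_step path) ([], [])
    (pvA_seq mov.1, pvA_seq mov.2)

-- ===== PORT B =====

-- [1 if b[axis] > a[axis] else -1 for a, b in zip(path, path[1:]) if b[axis] != a[axis]]
def pvB_moves (path : List (Int × Int)) (get : Int × Int → Int) : List Int :=
  (path.zip (PySem.List.slice path (some 1) none)).filterMap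
    (fun ab => if get ab.2 ≠ get ab.1 then some (if get ab.2 > get ab.1 then (1:Int) else -1) else none)

def pvB_ramp (movements : List Int) : List Int :=
  if movements = [] then [0]
  else
    let d := movements.headD 0
    let n : Int := movements.length
    ([0] ++ (PySem.List.pyRange 0 n 1).map (fun i => (max 1 (5 - min i (n - 1 - i))) * d)) ++ [0]

def build_sequences_from_bfs_path_alt (path : List (Int × Int)) (time_limit : Int) : List Int × List Int :=
  if path.length ≤ 1 then ([0], [0])
  else (pvB_ramp (pvB_moves path Prod.fst), pvB_ramp (pvB_moves path Prod.snd))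

-- ===== PRECONDITION & SPEC =====
def Spec_build_sequences_from_bfs_path (path : List (Int × Int)) (time_limit : Int) (out : List Int × List Int) : Prop := out = build_sequences_from_bfs_path_alt path time_limit
instance (path : List (Int × Int)) (time_limit : Int) (out : List Int × List Int) : Decidable (Spec_build_sequences_from_bfs_path path time_limit out) := by unfold Spec_build_sequences_from_bfs_path; infer_instance

-- ===== CLAIM (what is proved, stated in full; the proofs are below) =====
def Claim_equal_build_sequences_from_bfs_path : Prop := ∀ (path : List (Int × Int)) (time_limit : Int), Dom_build_sequences_from_bfs_path path time_limit → Spec_build_sequences_from_bfs_path path time_limit (build_sequences_from_bfs_path path time_limit)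

-- ===== LEMMAS AND PROOFS =====

-- shifting a head off the list shifts the (nonnegative) python index
theorem pv_shift (x : Int × Int) (l : List (Int × Int)) (j : Int) (hj : 0 ≤ j) :
    PySem.List.pyGetD (x :: l) (j + 1) (0, 0) = PySem.List.pyGetD l j (0, 0) := by
  lift j to Nat using hj
  rw [show ((j:Int) + 1) = (((j + 1 : Nat)) : Int) by push_cast; ring]
  simp only [PySem.List.pyGetD_natCast]
  simp [List.getD]

-- A's index loop computes exactly B's pairwise pass (with any accumulator prefix)
theorem pvA_collect_eq (path : List (Int × Int)) :
    ∀ acc : List Int × List Int,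
      (List.range (path.length - 1)).foldl (pvA_step path) acc
        = (acc.1 ++ pvB_moves path Prod.fst, acc.2 ++ pvB_moves path Prod.snd) := by
  induction path with
  | nil => intro acc; simp [pvB_moves, PySem.List.slice_from_one]
  | cons a tl ih =>
    intro acc
    cases tl with
    | nil => simp [pvB_moves, PySem.List.slice_from_one]
    | cons b rest =>
      have hlen : (a :: b :: rest).length - 1 = (b :: rest).length - 1 + 1 := by simp
      rw [hlen, List.range_succ_eq_map, List.foldl_cons, List.foldl_map]
      have hstep : (fun acc i => pvA_step (a :: b :: rest) acc (i + 1)) = pvA_step (b :: rest) := by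
        funext acc i
        simp only [pvA_step]
        rw [show (((i + 1) : Nat) : Int) = (i : Int) + 1 by push_cast; ring]
        rw [pv_shift a (b :: rest) ((i : Int) + 1) (by positivity)]
        rw [pv_shift a (b :: rest) (i : Int) (Int.natCast_nonneg i)]
      have hstep0 : pvA_step (a :: b :: rest) acc 0 =
          (acc.1 ++ (if b.1 ≠ a.1 then [if b.1 > a.1 then (1:Int) else -1] else []),
           acc.2 ++ (if b.2 ≠ a.2 then [if b.2 > a.2 then (1:Int) else -1] else [])) := by
        simp only [pvA_step, Nat.cast_zero]
        rw [pv_shift a (b :: rest) 0 le_rfl]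
        rw [PySem.List.pyGetD_zero_cons, PySem.List.pyGetD_zero_cons]
        split_ifs <;> simp_all
      have hmX : pvB_moves (a :: b :: rest) Prod.fst
          = (if b.1 ≠ a.1 then [if b.1 > a.1 then (1:Int) else -1] else []) ++ pvB_moves (b :: rest) Prod.fst := by
        simp only [pvB_moves, PySem.List.slice_from_one, List.tail_cons, List.zip_cons_cons,
          List.filterMap_cons]
        split_ifs <;> simp_all
      have hmY : pvB_moves (a :: b :: rest) Prod.snd
          = (if b.2 ≠ a.2 then [if b.2 > a.2 then (1:Int) else -1] else []) ++ pvB_moves (b :: rest) Prod.snd := by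
        simp only [pvB_moves, PySem.List.slice_from_one, List.tail_cons, List.zip_cons_cons,
          List.filterMap_cons]
        split_ifs <;> simp_all
      rw [hstep, hstep0, ih, hmX, hmY]
      simp

-- the constant-append loop is a replicate
theorem pv_foldl_const (c : Int) : ∀ (k : Nat) (s : List Int),
    (List.range k).foldl (fun s _ => s ++ [c]) s = s ++ List.replicate k c := by
  intro k
  induction k with
  | zero => simp
  | succ k ih =>
    intro s
    rw [List.range_succ, List.foldl_append, ih]
    simp [List.replicate_succ']

-- the closed-form ramp body for n >= 9 is A's 5..1, plateau of 1s, 2..5 shape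
theorem pv_rampCore_big (n : Nat) (d : Int) (h : 9 ≤ n) :
    (List.range n).map (fun (i : Nat) => (max 1 (5 - min (i:Int) ((n:Int) - 1 - (i:Int)))) * d)
      = [5*d, 4*d, 3*d, 2*d, 1*d] ++ (List.replicate (n - 9) (1*d) ++ [2*d, 3*d, 4*d, 5*d]) := by
  have hn : (9:Int) ≤ (n:Int) := by exact_mod_cast h
  have hsplit : n = 5 + ((n - 9) + 4) := by omega
  rw [hsplit, List.range_add, List.range_add]
  simp only [List.map_append, List.map_map]
  rw [← hsplit]
  congr 1
  · show List.map _ [0,1,2,3,4] = _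
    simp only [List.map_cons, List.map_nil]
    have e0 : max 1 (5 - min ((0:Nat):Int) ((n:Int) - 1 - ((0:Nat):Int))) = 5 := by push_cast; omega
    have e1 : max 1 (5 - min ((1:Nat):Int) ((n:Int) - 1 - ((1:Nat):Int))) = 4 := by push_cast; omega
    have e2 : max 1 (5 - min ((2:Nat):Int) ((n:Int) - 1 - ((2:Nat):Int))) = 3 := by push_cast; omega
    have e3 : max 1 (5 - min ((3:Nat):Int) ((n:Int) - 1 - ((3:Nat):Int))) = 2 := by push_cast; omega
    have e4 : max 1 (5 - min ((4:Nat):Int) ((n:Int) - 1 - ((4:Nat):Int))) = 1 := by push_cast; omega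
    rw [e0, e1, e2, e3, e4]
  congr 1
  · rw [List.eq_replicate_iff]
    refine ⟨by simp, ?_⟩
    intro b hb
    simp only [List.mem_map, List.mem_range] at hb
    obtain ⟨i, hi, rfl⟩ := hb
    have : max 1 (5 - min (((5 + i : Nat)):Int) ((n:Int) - 1 - ((5 + i : Nat):Int))) = 1 := by
      push_cast; omega
    simp only [Function.comp]
    rw [this]
  · show List.map _ [0,1,2,3] = _
    simp only [List.map_cons, List.map_nil, Function.comp]
    have e0 : max 1 (5 - min (((5 + ((n-9) + 0) : Nat)):Int) ((n:Int) - 1 - ((5 + ((n-9) + 0) : Nat):Int))) = 2 := by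
      push_cast [h]; omega
    have e1 : max 1 (5 - min (((5 + ((n-9) + 1) : Nat)):Int) ((n:Int) - 1 - ((5 + ((n-9) + 1) : Nat):Int))) = 3 := by
      push_cast [h]; omega
    have e2 : max 1 (5 - min (((5 + ((n-9) + 2) : Nat)):Int) ((n:Int) - 1 - ((5 + ((n-9) + 2) : Nat):Int))) = 4 := by
      push_cast [h]; omega
    have e3 : max 1 (5 - min (((5 + ((n-9) + 3) : Nat)):Int) ((n:Int) - 1 - ((5 + ((n-9) + 3) : Nat):Int))) = 5 := by
      push_cast [h]; omega
    rw [e0, e1, e2, e3]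

-- B's mapped python range as a Nat range
theorem pv_ramp_map (c : Nat) (d : Int) :
    (PySem.List.pyRange 0 (c:Int) 1).map (fun i => (max 1 (5 - min i ((c:Int) - 1 - i))) * d)
      = (List.range c).map (fun (i : Nat) => (max 1 (5 - min (i:Int) ((c:Int) - 1 - (i:Int)))) * d) := by
  rw [PySem.List.pyRange_one]
  simp [List.map_map, Function.comp]

-- A's movements_to_sequence equals B's closed-form ramp
theorem pvA_seq_eq_ramp (m : List Int) : pvA_seq m = pvB_ramp m := by
  cases m with
  | nil => rfl
  | cons d rest =>
    simp only [pvA_seq, pvB_ramp]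
    rw [if_neg (show ¬(d :: rest = []) from List.cons_ne_nil d rest),
        if_neg (show ¬(d :: rest = []) from List.cons_ne_nil d rest)]
    simp only [List.headD_cons, List.length_cons]
    rw [pv_ramp_map (rest.length + 1) d]
    generalize rest.length = k
    rcases Nat.lt_or_ge k 8 with hk | hk
    · have p3 : pvA_patterns.getD 3 [] = [5,4,5] := by decide
      have p4 : pvA_patterns.getD 4 [] = [5,4,4,5] := by decide
      have p5 : pvA_patterns.getD 5 [] = [5,4,3,4,5] := by decide
      have p6 : pvA_patterns.getD 6 [] = [5,4,3,3,4,5] := by decide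
      have p7 : pvA_patterns.getD 7 [] = [5,4,3,2,3,4,5] := by decide
      have p8 : pvA_patterns.getD 8 [] = [5,4,3,2,2,3,4,5] := by decide
      interval_cases k <;>
        · norm_num [p3, p4, p5, p6, p7, p8, List.range_succ, min_def, max_def]
    · have h9 : 9 ≤ k + 1 := by omega
      have h1 : ¬ (k + 1 = 1) := by omega
      have h2 : ¬ (k + 1 = 2) := by omega
      rw [if_neg h1, if_neg h2, if_pos h9]
      have hr5 : PySem.List.pyRange 5 0 (-1) = [5, 4, 3, 2, 1] := by decide
      have hr2 : PySem.List.pyRange 2 6 1 = [2, 3, 4, 5] := by decide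
      rw [hr5, hr2, PySem.List.foldl_append_singleton_eq_map, pv_foldl_const,
        PySem.List.foldl_append_singleton_eq_map, pv_rampCore_big (k+1) d h9]
      simp only [List.map_cons, List.map_nil]
      simp [List.append_assoc]

theorem build_sequences_from_bfs_path_spec : Claim_equal_build_sequences_from_bfs_path := by
  intro path time_limit _
  unfold Spec_build_sequences_from_bfs_path
  unfold build_sequences_from_bfs_path build_sequences_from_bfs_path_alt
  split_ifs with h
  · rfl
  · rw [pvA_collect_eq path ([], [])]
    simp [pvA_seq_eq_ramp]
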